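-- pv_equiv track=rewrite | github.com/ThomasPzt/Enigma_Cesar | brut-forceV2.py | combiner_avec_roulement
-- ===== SOURCE A (Python) =====
-- def combiner_avec_roulement(chaine1, chaine2, chaine3):
--     taille_max = max(len(chaine1), len(chaine2), len(chaine3))
--     resultat = ""
--
--     for i in range(taille_max):
--         if i < len(chaine1):
--             resultat += chaine1[i]
--         if i < len(chaine2):
--             resultat += chaine2[i]
--         if i < len(chaine3):
--             resultat += chaine3[i]
--
--     return resultat
-- ===== SOURCE B (Python) =====
-- def combiner_avec_roulement(chaine1, chaine2, chaine3):
--     morceaux = []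
--     while chaine1 or chaine2 or chaine3:
--         morceaux.append(chaine1[:1] + chaine2[:1] + chaine3[:1])
--         chaine1, chaine2, chaine3 = chaine1[1:], chaine2[1:], chaine3[1:]
--     return ''.join(morceaux)
-- ===== Notes on version B (the rewrite author's own statement) =====
-- stated objective: idiomatic
-- what changed: Replaced the index loop over range(max(len1,len2,len3)) with three 'i < len' guards by a prefix-consuming loop that repeatedly takes the first character of each remaining string (one-character slices, empty slices contribute nothing) and joins the collected chunks.
import Mathlib
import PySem

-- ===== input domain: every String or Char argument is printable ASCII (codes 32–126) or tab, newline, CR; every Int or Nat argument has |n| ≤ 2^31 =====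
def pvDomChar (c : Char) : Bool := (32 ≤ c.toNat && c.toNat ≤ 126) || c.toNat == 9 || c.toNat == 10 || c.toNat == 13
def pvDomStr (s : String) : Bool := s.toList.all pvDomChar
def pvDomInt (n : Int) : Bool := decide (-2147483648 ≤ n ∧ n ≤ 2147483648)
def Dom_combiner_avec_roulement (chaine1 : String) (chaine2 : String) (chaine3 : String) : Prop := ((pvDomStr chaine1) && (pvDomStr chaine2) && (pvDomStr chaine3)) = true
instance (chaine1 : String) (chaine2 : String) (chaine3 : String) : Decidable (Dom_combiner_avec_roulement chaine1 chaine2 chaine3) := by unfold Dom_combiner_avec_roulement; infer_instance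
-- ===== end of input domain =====

-- B replaces the guarded index loop over range(max of the three lengths) by a loop that
-- consumes the three strings one leading character at a time and joins the chunks (idiomatic).

-- ===== PORT A =====
-- the loop body: three guarded appends, one per string, in source order
def pvStepA (l1 l2 l3 : List Char) (resultat : List Char) (i : Int) : List Char :=
  let resultat := if i < (l1.length : Int) then resultat ++ (PySem.List.pyGet? l1 i).toList else resultat
  let resultat := if i < (l2.length : Int) then resultat ++ (PySem.List.pyGet? l2 i).toList else resultat
  if i < (l3.length : Int) then resultat ++ (PySem.List.pyGet? l3 i).toList else resultat

def combiner_avec_roulement (chaine1 : String) (chaine2 : String) (chaine3 : String) : String :=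
  let l1 := chaine1.toList
  let l2 := chaine2.toList
  let l3 := chaine3.toList
  let taille_max : Int := max (max (l1.length : Int) (l2.length : Int)) (l3.length : Int)
  String.mk ((PySem.List.pyRange 0 taille_max 1).foldl (pvStepA l1 l2 l3) [])

-- ===== PORT B =====
-- the while loop of Source B: collect chaine1[:1]+chaine2[:1]+chaine3[:1] chunks, drop first chars
def pvLoopB (c1 c2 c3 : List Char) (morceaux : List (List Char)) : List (List Char) :=
  if c1.isEmpty && c2.isEmpty && c3.isEmpty then morceaux
  else pvLoopB c1.tail c2.tail c3.tail (morceaux ++ [c1.take 1 ++ c2.take 1 ++ c3.take 1])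
termination_by c1.length + c2.length + c3.length
decreasing_by
  cases c1 <;> cases c2 <;> cases c3 <;> simp_all <;> omega

def combiner_avec_roulement_alt (chaine1 : String) (chaine2 : String) (chaine3 : String) : String :=
  String.mk (pvLoopB chaine1.toList chaine2.toList chaine3.toList []).flatten

-- ===== PRECONDITION & SPEC =====
def Spec_combiner_avec_roulement (chaine1 : String) (chaine2 : String) (chaine3 : String) (out : String) : Prop := out = combiner_avec_roulement_alt chaine1 chaine2 chaine3
instance (chaine1 : String) (chaine2 : String) (chaine3 : String) (out : String) : Decidable (Spec_combiner_avec_roulement chaine1 chaine2 chaine3 out) := by unfold Spec_combiner_avec_roulement; infer_instance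

-- ===== CLAIM (what is proved, stated in full; the proofs are below) =====
def Claim_equal_combiner_avec_roulement : Prop := ∀ (chaine1 : String) (chaine2 : String) (chaine3 : String), Dom_combiner_avec_roulement chaine1 chaine2 chaine3 → Spec_combiner_avec_roulement chaine1 chaine2 chaine3 (combiner_avec_roulement chaine1 chaine2 chaine3)

-- ===== LEMMAS AND PROOFS =====

-- one guarded append at index 0 is 'append the one-character prefix'
lemma pvStep0 (l : List Char) (acc : List Char) :
    (if (0:Int) < (l.length : Int) then acc ++ (PySem.List.pyGet? l 0).toList else acc)
      = acc ++ l.take 1 := by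
  cases l <;> simp

-- one guarded append at index 1+k on l is the guarded append at index k on l.tail
lemma pvStepShift1 (l : List Char) (acc : List Char) (k : Nat) :
    (if (1 + (k:Int)) < (l.length : Int) then acc ++ (PySem.List.pyGet? l (1 + (k:Int))).toList else acc)
      = (if (k:Int) < (l.tail.length : Int) then acc ++ (PySem.List.pyGet? l.tail (k:Int)).toList else acc) := by
  cases l with
  | nil =>
      simp
      intro h
      exact absurd h (by omega)
  | cons h t =>
      have h1 : (1 + (k:Int)) = (((k+1:Nat)):Int) := by push_cast; ring
      rw [h1]
      simp [PySem.List.pyGet?_natCast]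

lemma pvStepA_zero (l1 l2 l3 : List Char) (acc : List Char) :
    pvStepA l1 l2 l3 acc 0 = acc ++ (l1.take 1 ++ l2.take 1 ++ l3.take 1) := by
  simp only [pvStepA, pvStep0]
  simp

lemma pvStepA_shift (l1 l2 l3 : List Char) (acc : List Char) (k : Nat) :
    pvStepA l1 l2 l3 acc (1 + (k:Int)) = pvStepA l1.tail l2.tail l3.tail acc (k:Int) := by
  simp only [pvStepA, pvStepShift1]

-- fold over range(1,n) on the lists = fold over range(0,n-1) on the tails
lemma pvFoldShift (l1 l2 l3 : List Char) (n : Int) (acc : List Char) :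
    (PySem.List.pyRange 1 n 1).foldl (pvStepA l1 l2 l3) acc
      = (PySem.List.pyRange 0 (n-1) 1).foldl (pvStepA l1.tail l2.tail l3.tail) acc := by
  rw [PySem.List.pyRange_one 1 n, PySem.List.pyRange_one 0 (n-1)]
  rw [List.foldl_map, List.foldl_map]
  have hlen : (n - 1 - 0) = (n - 1) := by ring
  rw [hlen]
  simp only [zero_add]
  induction (List.range (n-1).toNat) generalizing acc with
  | nil => rfl
  | cons k ks ih =>
      simp only [List.foldl_cons]
      rw [pvStepA_shift]
      exact ih _

-- max of the three lengths shifts down by one on the tails (when positive)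
lemma pvMaxTail (a b c : Nat) (h : ¬ (a = 0 ∧ b = 0 ∧ c = 0)) :
    max (max ((a:Int)) (b:Int)) (c:Int) - 1
      = max (max ((a - 1 : Nat) : Int) ((b - 1 : Nat) : Int)) ((c - 1 : Nat) : Int) := by
  omega

-- main invariant: A's fold starting from the flattened chunk list equals B's loop, flattened
lemma pvMain : ∀ (l1 l2 l3 : List Char) (m : List (List Char)),
    (PySem.List.pyRange 0 (max (max (l1.length : Int) (l2.length : Int)) (l3.length : Int)) 1).foldl
        (pvStepA l1 l2 l3) m.flatten
      = (pvLoopB l1 l2 l3 m).flatten := by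
  intro l1 l2 l3 m
  fun_induction pvLoopB l1 l2 l3 m with
  | case1 c1 c2 c3 m h =>
      have h1 : c1 = [] ∧ c2 = [] ∧ c3 = [] := by
        cases c1 <;> cases c2 <;> cases c3 <;> simp_all
      obtain ⟨rfl, rfl, rfl⟩ := h1
      simp [PySem.List.pyRange_one_eq_nil]
  | case2 c1 c2 c3 m h ih =>
      have hne : ¬ (c1.length = 0 ∧ c2.length = 0 ∧ c3.length = 0) := by
        cases c1 <;> cases c2 <;> cases c3 <;> simp_all
      have hpos : (0:Int) < max (max (c1.length : Int) (c2.length : Int)) (c3.length : Int) := by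
        omega
      rw [PySem.List.pyRange_one_cons hpos, List.foldl_cons, pvStepA_zero]
      simp only [zero_add]
      rw [pvFoldShift]
      have hm : max (max (c1.length : Int) (c2.length : Int)) (c3.length : Int) - 1
          = max (max ((c1.tail.length : Nat) : Int) ((c2.tail.length : Nat) : Int)) ((c3.tail.length : Nat) : Int) := by
        simp only [List.length_tail]
        exact pvMaxTail _ _ _ hne
      rw [hm]
      have hflat : m.flatten ++ (c1.take 1 ++ c2.take 1 ++ c3.take 1)
          = (m ++ [c1.take 1 ++ c2.take 1 ++ c3.take 1]).flatten := by
        simp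
      rw [hflat]
      exact ih

-- ===== VERDICT (by name: the statement is the Claim_ definition above) =====
theorem combiner_avec_roulement_spec : Claim_equal_combiner_avec_roulement := by
  intro c1 c2 c3 _
  unfold Spec_combiner_avec_roulement combiner_avec_roulement combiner_avec_roulement_alt
  have := pvMain c1.toList c2.toList c3.toList []
  simp only [List.flatten_nil] at this
  simp only [this]
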